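-- pv_equiv track=rewrite | github.com/komajun365/competitive_programming | others/panasonic2020/e.py | calc
-- ===== SOURCE A (Python) =====
-- def calc(a,b):
--     ans = ''
--     for i in range(len(a)):
--         len_ab = min(len(a)-i, len(b))
--         tmp_a = a[i: i+len_ab]
--         tmp_b = b[:len_ab]
--         tmp = ''
--         flag = 1
--         for j in range(len_ab):
--             if(tmp_a[j]==tmp_b[j]):
--                 tmp += tmp_a[j]
--             elif(tmp_a[j]=='?'):
--                 tmp += tmp_b[j]
--             elif(tmp_b[j]=='?'):
--                 tmp += tmp_a[j]
--             else:
--                 flag = 0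
--                 break
--         if(flag == 1):
--             ans = ans + tmp + a[i+len_ab:] + b[len_ab:]
--             return(ans)
--         else:
--             ans += a[i]
--     return(a+b)
-- ===== SOURCE B (Python) =====
-- def calc(a, b):
--     if not a or not b:
--         return a + b
--     n, m = len(a), len(b)
--     first = None
--     live = []           # candidate offsets whose overlap seen so far is compatible
--     for k in range(n):
--         x = a[k]
--         live.append(k)  # offset k becomes a candidate at position k
--         keep = []
--         for i in live:
--             y = b[k - i]
--             if x == y or x == '?' or y == '?':
--                 if i + m == k + 1:
--                     first = i       # candidate completed its full window
--                     break
--                 keep.append(i)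
--         if first is not None:
--             break
--         live = keep
--     if first is None:
--         first = live[0] if live else n   # smallest surviving truncated candidate
--     merged = ''.join(y if x == '?' else x for x, y in zip(a[first:], b))
--     km = len(merged)
--     return a[:first] + merged + a[first + km:] + b[km:]
-- ===== Notes on version B (the rewrite author's own statement) =====
-- stated objective: alternative
-- what changed: Replaces A's offset-by-offset rescan (two slice copies plus an inner character loop with flag/break for every offset) by a single left-to-right pass over a that maintains the list of still-viable candidate offsets of the wildcard overlay, filtering it with one character comparison per live candidate per position; the first candidate to complete its window (or the smallest survivor) is the merge offset, followed by one O(overlap) merge.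
import Mathlib
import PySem

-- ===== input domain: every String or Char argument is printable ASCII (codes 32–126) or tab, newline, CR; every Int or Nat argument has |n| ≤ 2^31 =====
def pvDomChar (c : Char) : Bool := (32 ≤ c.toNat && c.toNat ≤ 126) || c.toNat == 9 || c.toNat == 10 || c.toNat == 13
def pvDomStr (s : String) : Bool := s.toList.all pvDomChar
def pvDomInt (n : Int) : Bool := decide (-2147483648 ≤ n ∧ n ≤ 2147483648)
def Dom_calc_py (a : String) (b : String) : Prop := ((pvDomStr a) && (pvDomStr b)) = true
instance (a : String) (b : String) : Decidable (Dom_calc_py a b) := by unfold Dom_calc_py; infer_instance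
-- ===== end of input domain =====

-- B replaces A's per-offset rescan by a single left-to-right pass over a maintaining the list of live
-- candidate offsets of the wildcard overlay (one char comparison per live candidate); objective: alternative.

-- ===== PORT A =====
-- inner loop 'for j in range(len_ab)' building tmp with flag/break; the two slices
-- have equal length, so indexing j into both is transcribed as paired structural recursion
def pvAInner : List Char → List Char → (List Char × Nat)
  | x :: xs, y :: ys =>
    if x == y then
      let r := pvAInner xs ys; (x :: r.1, r.2)
    else if x == '?' then
      let r := pvAInner xs ys; (y :: r.1, r.2)
    else if y == '?' then
      let r := pvAInner xs ys; (x :: r.1, r.2)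
    else ([], 0)      -- flag = 0; break (tmp is discarded by the caller on this path)
  | _, _ => ([], 1)

-- outer loop 'for i in range(len(a))' with accumulator ans and the early return
def pvALoop (a b : List Char) (i : Nat) (ans : List Char) : List Char :=
  if h : i < a.length then
    let len_ab := min (a.length - i) b.length
    let tmp_a := PySem.List.slice a (some (i : Int)) (some ((i : Int) + (len_ab : Int)))
    let tmp_b := PySem.List.slice b none (some (len_ab : Int))
    let r := pvAInner tmp_a tmp_b
    if r.2 == 1 then
      ans ++ r.1 ++ PySem.List.slice a (some ((i : Int) + (len_ab : Int))) none
          ++ PySem.List.slice b (some (len_ab : Int)) none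
    else
      pvALoop a b (i + 1) (ans ++ [a.get ⟨i, h⟩])   -- a[i], in range since i < len(a)
  else a ++ b
termination_by a.length - i

def calc_py (a : String) (b : String) : String :=
  String.ofList (pvALoop a.toList b.toList 0 [])

-- ===== PORT B =====
-- candidate-compatibility test 'x == y or x == "?" or y == "?"' (named helper used by the port)
def pvCOk (x y : Char) : Bool := x == y || x == '?' || y == '?'

-- inner 'for i in live' loop with keep accumulator and break on a completed window
def pvBInner (b : List Char) (m k : Nat) (x : Char) : List Nat → List Nat → (List Nat × Option Nat)
  | [], keep => (keep, none)
  | i :: rest, keep =>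
    let y := b.getD (k - i) ' '    -- b[k-i]; every live candidate has k - i < len(b)
    if pvCOk x y then
      if i + m == k + 1 then (keep, some i)
      else pvBInner b m k x rest (keep ++ [i])
    else pvBInner b m k x rest keep

-- outer 'for k in range(n)' loop carrying (first, live) with early break
def pvBLoop (b : List Char) (m : Nat) : List Char → Nat → List Nat → (Option Nat × List Nat)
  | [], _, live => (none, live)
  | x :: xs, k, live =>
    let r := pvBInner b m k x (live ++ [k]) []
    match r.2 with
    | some i => (some i, r.1)
    | none => pvBLoop b m xs (k + 1) r.1

def calc_py_alt (a : String) (b : String) : String :=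
  let al := a.toList
  let bl := b.toList
  if al.isEmpty || bl.isEmpty then String.ofList (al ++ bl)
  else
    let n := al.length
    let m := bl.length
    let r := pvBLoop bl m al 0 []
    let first : Nat :=
      match r.1 with
      | some i => i
      | none => match r.2 with
        | i :: _ => i            -- live[0] if live else n
        | [] => n
    let merged := ((al.drop first).zip bl).map (fun p => if p.1 == '?' then p.2 else p.1)
    let km := merged.length
    String.ofList (al.take first ++ merged ++ al.drop (first + km) ++ bl.drop km)

-- ===== PRECONDITION & SPEC =====
def Spec_calc_py (a : String) (b : String) (out : String) : Prop := out = calc_py_alt a b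
instance (a : String) (b : String) (out : String) : Decidable (Spec_calc_py a b out) := by unfold Spec_calc_py; infer_instance

-- ===== CLAIM (what is proved, stated in full; the proofs are below) =====
def Claim_equal_calc_py : Prop := ∀ (a : String) (b : String), Dom_calc_py a b → Spec_calc_py a b (calc_py a b)

-- ===== LEMMAS AND PROOFS =====

-- proof-side vocabulary: wildcard compatibility, first compatible offset, merged overlay
def pvBOk (s t : List Char) : Bool :=
  (s.zip t).all (fun p => p.1 == p.2 || p.1 == '?' || p.2 == '?')

def pvBMerge (s t : List Char) : List Char :=
  (s.zip t).map (fun p => if p.1 == '?' then p.2 else p.1)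

def pvBFind (a b : List Char) (i : Nat) : Nat :=
  if i < a.length then
    if pvBOk (a.drop i) b then i else pvBFind a b (i + 1)
  else a.length
termination_by a.length - i

def pvBFrom (a b : List Char) (i : Nat) : List Char :=
  let j := pvBFind a b i
  let merged := pvBMerge (a.drop j) b
  a.take j ++ merged ++ a.drop (j + merged.length) ++ b.drop merged.length

theorem pvAInner_snd (s t : List Char) :
    (pvAInner s t).2 = (if pvBOk s t then 1 else 0) := by
  induction s generalizing t with
  | nil => simp [pvAInner, pvBOk]
  | cons x xs ih =>
    cases t with
    | nil => simp [pvAInner, pvBOk]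
    | cons y ys =>
      simp only [pvAInner, pvBOk, List.zip_cons_cons, List.all_cons]
      by_cases hxy : x == y
      · simp [hxy, ih, pvBOk]
      · by_cases hx : x == '?'
        · simp [hxy, hx, ih, pvBOk]
        · by_cases hy : y == '?'
          · simp [hxy, hx, hy, ih, pvBOk]
          · simp [hxy, hx, hy]

theorem pvAInner_fst (s t : List Char) (h : pvBOk s t = true) :
    (pvAInner s t).1 = pvBMerge s t := by
  induction s generalizing t with
  | nil => simp [pvAInner, pvBMerge]
  | cons x xs ih =>
    cases t with
    | nil => simp [pvAInner, pvBMerge]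
    | cons y ys =>
      simp only [pvBOk, List.zip_cons_cons, List.all_cons, Bool.and_eq_true] at h
      obtain ⟨h1, h2⟩ := h
      simp only [pvAInner, pvBMerge, List.zip_cons_cons, List.map_cons]
      by_cases hxy : x == y
      · have hxy' : x = y := by simpa using hxy
        subst hxy'
        by_cases hx : x == '?'
        · have hx' : x = '?' := by simpa using hx
          simp [hx', ih ys h2, pvBMerge]
        · simp [hx, ih ys h2, pvBMerge]
      · by_cases hx : x == '?'
        · simp [hxy, hx, ih ys h2, pvBMerge]
        · by_cases hy : y == '?'
          · simp [hxy, hx, hy, ih ys h2, pvBMerge]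
          · simp [hxy, hx, hy] at h1

-- zip of the two clipped slices equals zip of the suffix with b
theorem pv_zip_take (s t : List Char) (n : Nat) (hn : n = min s.length t.length) :
    (s.take n).zip (t.take n) = s.zip t := by
  subst hn
  rw [List.zip_eq_zipWith, List.zip_eq_zipWith, ← List.take_zipWith]
  exact List.take_of_length_le (by simp)

theorem pvBMerge_length (s t : List Char) :
    (pvBMerge s t).length = min s.length t.length := by
  simp [pvBMerge]

theorem pvALoop_eq (a b : List Char) (i : Nat) (hi : i ≤ a.length) :
    pvALoop a b i (a.take i) = pvBFrom a b i := by
  by_cases h : i < a.length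
  · have hslice_a :
        PySem.List.slice a (some (i : Int)) (some ((i : Int) + ((min (a.length - i) b.length : Nat) : Int)))
          = (a.drop i).take (min (a.length - i) b.length) := by
      simpa using PySem.List.slice_natCast_add a i (min (a.length - i) b.length)
    have hslice_b : PySem.List.slice b none (some (((min (a.length - i) b.length : Nat) : Int)))
          = b.take (min (a.length - i) b.length) :=
      PySem.List.slice_to_natCast b _
    have hzip : ((a.drop i).take (min (a.length - i) b.length)).zip
          (b.take (min (a.length - i) b.length)) = (a.drop i).zip b := by
      apply pv_zip_take
      simp [List.length_drop]
    have hokeq : pvBOk ((a.drop i).take (min (a.length - i) b.length))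
          (b.take (min (a.length - i) b.length)) = pvBOk (a.drop i) b := by
      simp [pvBOk, hzip]
    have hmergeeq : pvBMerge ((a.drop i).take (min (a.length - i) b.length))
          (b.take (min (a.length - i) b.length)) = pvBMerge (a.drop i) b := by
      simp [pvBMerge, hzip]
    rw [pvALoop]
    simp only [h, dif_pos, hslice_a, hslice_b]
    by_cases hok : pvBOk (a.drop i) b
    · have hsnd : (pvAInner ((a.drop i).take (min (a.length - i) b.length))
          (b.take (min (a.length - i) b.length))).2 = 1 := by
        rw [pvAInner_snd, hokeq, hok]; rfl
      have hfst : (pvAInner ((a.drop i).take (min (a.length - i) b.length))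
          (b.take (min (a.length - i) b.length))).1 = pvBMerge (a.drop i) b := by
        rw [pvAInner_fst _ _ (by rw [hokeq]; exact hok), hmergeeq]
      have hfind : pvBFind a b i = i := by rw [pvBFind]; simp [h, hok]
      have hlen : (pvBMerge (a.drop i) b).length = min (a.length - i) b.length := by
        rw [pvBMerge_length]; simp [List.length_drop]
      simp only [hsnd, hfst, beq_self_eq_true, if_true, pvBFrom, hfind, hlen]
      have h1 : PySem.List.slice a (some ((i : Int) + ((min (a.length - i) b.length : Nat) : Int))) none
          = a.drop (i + min (a.length - i) b.length) := by
        have := PySem.List.slice_from_natCast a (i + min (a.length - i) b.length)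
        simpa [Int.natCast_add] using this
      have h2 : PySem.List.slice b (some (((min (a.length - i) b.length : Nat) : Int))) none
          = b.drop (min (a.length - i) b.length) := PySem.List.slice_from_natCast b _
      push_cast at h1 h2 ⊢
      simp [h1, h2]
    · have hsnd : (pvAInner ((a.drop i).take (min (a.length - i) b.length))
          (b.take (min (a.length - i) b.length))).2 = 0 := by
        rw [pvAInner_snd, hokeq]; simp [hok]
      have hfind : pvBFind a b i = pvBFind a b (i + 1) := by
        rw [pvBFind]; simp [h, hok]
      simp only [hsnd]
      norm_num
      rw [pvALoop_eq a b (i + 1) h]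
      simp [pvBFrom, hfind]
  · have hieq : i = a.length := le_antisymm hi (not_lt.mp h)
    subst hieq
    rw [pvALoop]
    simp only [lt_irrefl, dif_neg, not_false_iff]
    have hfind : pvBFind a b a.length = a.length := by rw [pvBFind]; simp
    simp [pvBFrom, hfind, pvBMerge]
termination_by a.length - i

abbrev pvCharOk (x y : Char) : Prop := x = y ∨ x = '?' ∨ y = '?'

theorem pvCOk_iff (x y : Char) : pvCOk x y = true ↔ pvCharOk x y := by
  simp [pvCOk, pvCharOk]; tauto

theorem pvBOk_iff (s t : List Char) :
    pvBOk s t = true ↔ ∀ u, u < min s.length t.length →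
      pvCharOk (s.getD u ' ') (t.getD u ' ') := by
  rw [pvBOk, List.all_eq_true]
  constructor
  · intro h u hu
    have hs : u < s.length := by omega
    have ht : u < t.length := by omega
    have hz : u < (s.zip t).length := by simp; omega
    have := h ((s.zip t)[u]) (List.getElem_mem hz)
    rw [List.getElem_zip] at this
    rw [List.getD_eq_getElem _ _ hs, List.getD_eq_getElem _ _ ht]
    simp only [Bool.or_eq_true, beq_iff_eq] at this
    unfold pvCharOk; tauto
  · intro h p hp
    obtain ⟨u, hu, rfl⟩ := List.mem_iff_getElem.mp hp
    rw [List.getElem_zip]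
    have hs : u < s.length := by simp at hu; omega
    have ht : u < t.length := by simp at hu; omega
    have := h u (by omega)
    rw [List.getD_eq_getElem _ _ hs, List.getD_eq_getElem _ _ ht] at this
    unfold pvCharOk at this
    simp only [Bool.or_eq_true, beq_iff_eq]
    tauto

theorem pvBFind_eq (a b : List Char) (i0 i : Nat) (h0 : i0 ≤ i) (hi : i < a.length)
    (hok : pvBOk (a.drop i) b = true)
    (hmin : ∀ i', i0 ≤ i' → i' < i → pvBOk (a.drop i') b = false) :
    pvBFind a b i0 = i := by
  rw [pvBFind, if_pos (by omega)]
  by_cases h : pvBOk (a.drop i0) b = true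
  · rw [if_pos h]
    by_contra hne
    have : i0 < i := by omega
    rw [hmin i0 le_rfl this] at h
    exact Bool.false_ne_true h
  · rw [if_neg h]
    have hne : i0 ≠ i := fun e => h (e ▸ hok)
    exact pvBFind_eq a b (i0 + 1) i (by omega) hi hok
      (fun i' h1 h2 => hmin i' (by omega) h2)
termination_by a.length - i0

theorem pvBFind_none (a b : List Char) (i0 : Nat)
    (h : ∀ i', i0 ≤ i' → i' < a.length → pvBOk (a.drop i') b = false) :
    pvBFind a b i0 = a.length := by
  rw [pvBFind]
  by_cases hl : i0 < a.length
  · rw [if_pos hl, if_neg (by rw [h i0 le_rfl hl]; exact Bool.false_ne_true)]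
    exact pvBFind_none a b (i0 + 1) (fun i' h1 h2 => h i' (by omega) h2)
  · rw [if_neg hl]
termination_by a.length - i0

theorem pv_drop_getD (a : List Char) (i u : Nat) (h : i + u < a.length) :
    (a.drop i).getD u ' ' = a.getD (i + u) ' ' := by
  rw [List.getD_eq_getElem _ _ (by simp; omega), List.getD_eq_getElem _ _ h]
  simp [List.getElem_drop]

-- candidate i's overlap seen after k processed positions is compatible
def pvWin (a b : List Char) (i k : Nat) : Bool :=
  (List.range (k - i)).all (fun t => pvCOk (a.getD (i + t) ' ') (b.getD t ' '))

theorem pvWin_succ (a b : List Char) (i k : Nat) (hik : i ≤ k) :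
    pvWin a b i (k + 1) = (pvWin a b i k && pvCOk (a.getD k ' ') (b.getD (k - i) ' ')) := by
  unfold pvWin
  rw [show k + 1 - i = (k - i) + 1 by omega, List.range_succ, List.all_append]
  simp [show i + (k - i) = k by omega]

theorem pvWin_full (a b : List Char) (i K : Nat) (hi : i < a.length)
    (hKi : K - i = min (a.length - i) b.length) :
    pvWin a b i K = true ↔ pvBOk (a.drop i) b = true := by
  rw [pvBOk_iff, pvWin, List.all_eq_true]
  constructor
  · intro h u hu
    have hau : i + u < a.length := by simp at hu; omega
    have := h u (by rw [List.mem_range]; simp at hu; omega)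
    rw [pvCOk_iff] at this
    rwa [pv_drop_getD _ _ _ hau]
  · intro h t ht
    rw [List.mem_range] at ht
    have hau : i + t < a.length := by omega
    have := h t (by simp; omega)
    rw [pv_drop_getD _ _ _ hau] at this
    rw [pvCOk_iff]
    exact this

theorem pvBInner_none (b : List Char) (m k : Nat) (x : Char) (lst keep : List Nat)
    (h : ∀ i ∈ lst, ¬(pvCOk x (b.getD (k - i) ' ') = true ∧ i + m = k + 1)) :
    pvBInner b m k x lst keep
      = (keep ++ lst.filter (fun i => pvCOk x (b.getD (k - i) ' ')), none) := by
  induction lst generalizing keep with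
  | nil => simp [pvBInner]
  | cons i rest ih =>
    simp only [pvBInner]
    by_cases hc : pvCOk x (b.getD (k - i) ' ') = true
    · rw [if_pos hc, if_neg (by
        have := h i (List.mem_cons_self ..)
        simp only [beq_iff_eq]
        exact fun he => this ⟨hc, he⟩)]
      rw [ih (keep ++ [i]) (fun j hj => h j (List.mem_cons_of_mem _ hj))]
      rw [List.filter_cons, if_pos hc]
      simp
    · rw [if_neg hc, ih keep (fun j hj => h j (List.mem_cons_of_mem _ hj))]
      rw [List.filter_cons, if_neg hc]

theorem pvBInner_some (b : List Char) (m k : Nat) (x : Char) (lst keep : List Nat)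
    (h : ∃ i ∈ lst, pvCOk x (b.getD (k - i) ' ') = true ∧ i + m = k + 1) :
    (pvBInner b m k x lst keep).2 = some (k + 1 - m) := by
  induction lst generalizing keep with
  | nil => simp at h
  | cons i rest ih =>
    obtain ⟨i0, hi0mem, hi0c, hi0e⟩ := h
    simp only [pvBInner]
    by_cases hc : pvCOk x (b.getD (k - i) ' ') = true
    · rw [if_pos hc]
      by_cases he : i + m = k + 1
      · rw [if_pos (by simpa using he)]
        simp; omega
      · rw [if_neg (by simpa using he)]
        apply ih
        rcases List.mem_cons.mp hi0mem with rfl | hmem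
        · exact absurd hi0e he
        · exact ⟨i0, hmem, hi0c, hi0e⟩
    · rw [if_neg hc]
      apply ih
      rcases List.mem_cons.mp hi0mem with rfl | hmem
      · exact absurd hi0c hc
      · exact ⟨i0, hmem, hi0c, hi0e⟩

theorem pvBLoop_eq (a b : List Char) (ha : 0 < a.length) (hb : 0 < b.length)
    (k : Nat) (live : List Nat) (hk : k ≤ a.length)
    (hlive : live = (List.range k).filter
      (fun i => decide (k < i + b.length) && pvWin a b i k))
    (hno : ∀ i, i + b.length ≤ k → pvBOk (a.drop i) b = false) :
    (match (pvBLoop b b.length (a.drop k) k live).1 with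
     | some i => i
     | none => match (pvBLoop b b.length (a.drop k) k live).2 with
       | i :: _ => i
       | [] => a.length) = pvBFind a b 0 := by
  by_cases hkn : k < a.length
  case neg =>
    have hkeq : k = a.length := by omega
    subst hkeq
    rw [List.drop_length]
    simp only [pvBLoop]
    rw [hlive]
    cases hfl : (List.range a.length).filter
        (fun i => decide (a.length < i + b.length) && pvWin a b i a.length) with
    | nil =>
      simp only
      refine (pvBFind_none a b 0 ?_).symm
      intro i' _ hi'
      by_cases hc : i' + b.length ≤ a.length
      · exact hno i' hc
      · have hnp : ¬(decide (a.length < i' + b.length) && pvWin a b i' a.length) = true := by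
          intro hpred
          have hm : i' ∈ (List.range a.length).filter
              (fun i => decide (a.length < i + b.length) && pvWin a b i a.length) :=
            List.mem_filter.mpr ⟨List.mem_range.mpr hi', hpred⟩
          rw [hfl] at hm
          simp at hm
        have hwin : ¬ pvWin a b i' a.length = true := by
          intro hw
          exact hnp (by rw [Bool.and_eq_true]; exact ⟨by simp; omega, hw⟩)
        rw [← Bool.not_eq_true]
        intro hok
        exact hwin ((pvWin_full a b i' a.length hi' (by omega)).mpr hok)
    | cons i0 rest =>
      simp only
      have hmem : i0 ∈ (List.range a.length).filter
          (fun i => decide (a.length < i + b.length) && pvWin a b i a.length) := by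
        rw [hfl]; exact List.mem_cons_self ..
      obtain ⟨hrange, hpred⟩ := List.mem_filter.mp hmem
      rw [List.mem_range] at hrange
      rw [Bool.and_eq_true, decide_eq_true_eq] at hpred
      obtain ⟨hlt, hwin⟩ := hpred
      have hok : pvBOk (a.drop i0) b = true :=
        (pvWin_full a b i0 a.length hrange (by omega)).mp hwin
      refine (pvBFind_eq a b 0 i0 (Nat.zero_le _) hrange hok ?_).symm
      intro i' _ hi'lt
      by_cases hc : i' + b.length ≤ a.length
      · exact hno i' hc
      · rw [← Bool.not_eq_true]
        intro hok'
        have hi'n : i' < a.length := by omega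
        have hw' := (pvWin_full a b i' a.length hi'n (by omega)).mpr hok'
        have hm : i' ∈ (List.range a.length).filter
            (fun i => decide (a.length < i + b.length) && pvWin a b i a.length) :=
          List.mem_filter.mpr ⟨List.mem_range.mpr hi'n,
            by rw [Bool.and_eq_true]; exact ⟨by simp; omega, hw'⟩⟩
        have hpw : ((List.range a.length).filter
            (fun i => decide (a.length < i + b.length) && pvWin a b i a.length)).Pairwise
              (· < ·) := List.Pairwise.filter _ List.pairwise_lt_range
        rw [hfl] at hm hpw
        rcases List.mem_cons.mp hm with rfl | hmemr
        · omega
        · have := (List.pairwise_cons.mp hpw).1 i' hmemr; omega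
  case pos =>
    rw [List.drop_eq_getElem_cons hkn]
    simp only [pvBLoop]
    by_cases hcomp : ∃ i ∈ live ++ [k],
        pvCOk a[k] (b.getD (k - i) ' ') = true ∧ i + b.length = k + 1
    · rw [pvBInner_some b b.length k a[k] (live ++ [k]) [] hcomp]
      simp only
      obtain ⟨iw, hiwmem, hiwc, hiwe⟩ := hcomp
      have hiweq : iw = k + 1 - b.length := by omega
      have hwin : pvWin a b iw (k + 1) = true := by
        rcases List.mem_append.mp hiwmem with hmeml | hmemr
        · rw [hlive] at hmeml
          obtain ⟨hr, hp⟩ := List.mem_filter.mp hmeml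
          rw [List.mem_range] at hr
          rw [Bool.and_eq_true] at hp
          rw [pvWin_succ a b iw k (by omega), Bool.and_eq_true]
          refine ⟨hp.2, ?_⟩
          rwa [List.getD_eq_getElem _ _ hkn]
        · have hiwk : iw = k := by simpa using hmemr
          subst hiwk
          rw [pvWin_succ a b iw iw (le_refl _), Bool.and_eq_true]
          constructor
          · unfold pvWin; simp
          · rw [List.getD_eq_getElem _ _ hkn]; simpa using hiwc
      have hok : pvBOk (a.drop iw) b = true :=
        (pvWin_full a b iw (k + 1) (by omega) (by omega)).mp hwin
      rw [hiweq] at hok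
      refine (pvBFind_eq a b 0 (k + 1 - b.length) (Nat.zero_le _) (by omega) hok ?_).symm
      intro i' _ hi'
      exact hno i' (by omega)
    · push_neg at hcomp
      rw [pvBInner_none b b.length k a[k] (live ++ [k]) []
        (fun i hi h => hcomp i hi h.1 h.2)]
      simp only [List.nil_append]
      apply pvBLoop_eq a b ha hb (k + 1) _ (by omega) ?_ ?_
      · -- live invariant at k+1
        rw [hlive, List.range_succ, List.filter_append, List.filter_append,
          List.filter_filter]
        congr 1
        · apply List.filter_congr
          intro i hi
          rw [List.mem_range] at hi
          rw [pvWin_succ a b i k (by omega)]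
          by_cases h1 : i + b.length ≤ k
          · have e1 : decide (k < i + b.length) = false := by simp; omega
            have e2 : decide (k + 1 < i + b.length) = false := by simp; omega
            rw [e1, e2]; simp
          · by_cases h2 : i + b.length = k + 1
            · have e2 : decide (k + 1 < i + b.length) = false := by simp; omega
              have e1 : decide (k < i + b.length) = true := by simp; omega
              rw [e1, e2]
              simp only [Bool.true_and, Bool.false_and]
              by_cases hw : pvWin a b i k = true
              · have hcok : pvCOk a[k] (b.getD (k - i) ' ') = false := by
                  rw [← Bool.not_eq_true]
                  intro hcc
                  have hmem : i ∈ live := by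
                    rw [hlive]
                    exact List.mem_filter.mpr ⟨List.mem_range.mpr hi,
                      by rw [Bool.and_eq_true]; exact ⟨by simp; omega, hw⟩⟩
                  exact hcomp i (List.mem_append.mpr (Or.inl hmem)) hcc h2
                rw [show (b.getD (k - i) ' ') = b.getD (k - i) ' ' from rfl] at hcok
                rw [hw, hcok]; simp
              · simp only [Bool.not_eq_true] at hw
                rw [hw]; simp
            · have e1 : decide (k < i + b.length) = true := by simp; omega
              have e2 : decide (k + 1 < i + b.length) = true := by simp; omega
              rw [e1, e2, List.getD_eq_getElem _ _ hkn]
              simp [Bool.and_comm, Bool.and_assoc, Bool.and_left_comm]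
        · -- the [k] element
          simp only [List.filter_cons, List.filter_nil]
          have hwk1 : pvWin a b k (k + 1)
              = pvCOk a[k] (b.getD (k - k) ' ') := by
            rw [pvWin_succ a b k k (le_refl _)]
            have h0 : pvWin a b k k = true := by unfold pvWin; simp
            rw [h0, Bool.true_and, List.getD_eq_getElem _ _ hkn]
          by_cases hck : pvCOk a[k] (b.getD (k - k) ' ') = true
          · have hm1 : ¬ k + b.length = k + 1 := by
              intro he
              exact hcomp k (List.mem_append.mpr (Or.inr (List.mem_singleton.mpr rfl))) hck he
            have e1 : decide (k + 1 < k + b.length) = true := by simp; omega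
            rw [hck, e1, hwk1, hck]
            simp
          · simp only [Bool.not_eq_true] at hck
            rw [hck, hwk1, hck]
            simp
      · -- no-completion invariant at k+1
        intro i hi
        by_cases hik : i + b.length ≤ k
        · exact hno i hik
        · have hieq : i + b.length = k + 1 := by omega
          have hin : i < a.length := by omega
          rw [← Bool.not_eq_true]
          intro hok
          have hw := (pvWin_full a b i (k + 1) hin (by omega)).mpr hok
          rw [pvWin_succ a b i k (by omega), Bool.and_eq_true] at hw
          obtain ⟨hw1, hw2⟩ := hw
          rw [List.getD_eq_getElem _ _ hkn] at hw2
          by_cases hike : i = k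
          · exact hcomp i (List.mem_append.mpr (Or.inr (by simp [hike]))) hw2 hieq
          · have hmem : i ∈ live := by
              rw [hlive]
              exact List.mem_filter.mpr ⟨List.mem_range.mpr (by omega),
                by rw [Bool.and_eq_true]; exact ⟨by simp; omega, hw1⟩⟩
            exact hcomp i (List.mem_append.mpr (Or.inl hmem)) hw2 hieq
  termination_by a.length - k

theorem pv_alt_eq_from (a b : List Char) :
    calc_py_alt (String.ofList a) (String.ofList b) = String.ofList (pvBFrom a b 0) := by
  have hta : (String.ofList a).toList = a := by simp
  have htb : (String.ofList b).toList = b := by simp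
  by_cases ha : a = []
  · subst ha
    have hfind : pvBFind [] b 0 = 0 := by rw [pvBFind]; simp
    simp [calc_py_alt, pvBFrom, hfind, pvBMerge]
  · by_cases hbe : b = []
    · subst hbe
      have hfind : pvBFind a [] 0 = 0 := by
        rw [pvBFind, if_pos (by simpa using List.length_pos_iff.mpr ha),
          if_pos (by simp [pvBOk])]
      simp [calc_py_alt, hta, pvBFrom, hfind, pvBMerge]
    · have hal : 0 < a.length := List.length_pos_iff.mpr ha
      have hbl : 0 < b.length := List.length_pos_iff.mpr hbe
      have hloop := pvBLoop_eq a b hal hbl 0 [] (by omega)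
        (by simp) (fun i hi => absurd hi (by omega))
      rw [List.drop_zero] at hloop
      simp only [calc_py_alt, hta, htb]
      rw [if_neg (by simp [ha, hbe])]
      rw [hloop]
      rfl

-- ===== VERDICT (by name: the statement is the Claim_ definition above) =====
theorem calc_py_spec : Claim_equal_calc_py := by
  intro a b _
  unfold Spec_calc_py calc_py
  have halt := pv_alt_eq_from a.toList b.toList
  have h0 := pvALoop_eq a.toList b.toList 0 (Nat.zero_le _)
  simp only [List.take_zero] at h0
  rw [h0]
  rw [String.ofList_toList, String.ofList_toList] at halt
  rw [halt]
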